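-- pv_equiv track=rewrite | github.com/avangogo/photo-ordering | python/main.py | min_page_feasible
-- ===== SOURCE A (Python) =====
-- import sys, itertools, math
--
-- def min_page_feasible(graph: dict, max_by_page: int) -> int:
--     n_photos = len(graph)
--     if n_photos == 0:
--         return 0
--     if max_by_page == 1:
--         return n_photos
--     # Case 1: Remove photos without dependency
--     photos_no_dependency = isolated_vertices(graph)
--     if photos_no_dependency:
--         for photo in photos_no_dependency:
--             del graph[photo]
--         return max(min_page_feasible(graph, max_by_page), int(math.ceil(n_photos/max_by_page)))
--     # Get available photos
--     photos_ready = roots(graph)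
--     # Case 2: all of them fits on the next page
--     if len(photos_ready) <= max_by_page:
--         for photo in photos_ready:
--             del graph[photo]
--         return 1 + min_page_feasible(graph, max_by_page)
--     # Case 3: Bruteforce on all combination for the next page
--     else:
--         result = n_photos
--         for page in itertools.combinations(photos_ready, max_by_page):
--             subgraph = graph.copy()
--             for photo in page:
--                 del subgraph[photo]
--             result = min(result, 1 + min_page_feasible(subgraph, max_by_page))
--         return result
--
-- def roots(graph: dict):
--     result = set(graph.keys())
--     for neighbourhood in graph.values():
--         for v in neighbourhood:
--             if v in result:
--                 result.remove(v)
--     return result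
--
-- def isolated_vertices(graph: dict):
--     return [ v for v in roots(graph) if len(graph[v]) == 0 ]
-- ===== SOURCE B (Python) =====
-- import itertools
--
-- def min_page_feasible(graph: dict, max_by_page: int) -> int:
--     # Memoized subset DP: one pure solver over the frozenset of remaining photos,
--     # with the adjacency fixed once; does not mutate the caller's dict (A does).
--     adj = dict(graph)
--     memo = {}
--
--     def solve(remaining: frozenset) -> int:
--         n = len(remaining)
--         if n == 0:
--             return 0
--         if max_by_page == 1:
--             return n
--         if remaining in memo:
--             return memo[remaining]
--         blocked = {v for u in remaining for v in adj[u]}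
--         ready = [v for v in remaining if v not in blocked]
--         isolated = [v for v in ready if not adj[v]]
--         if isolated:
--             res = max(solve(remaining.difference(isolated)),
--                       -(-n // max_by_page))
--         elif len(ready) <= max_by_page:
--             res = 1 + solve(remaining.difference(ready))
--         else:
--             res = n
--             for page in itertools.combinations(ready, max_by_page):
--                 res = min(res, 1 + solve(remaining.difference(page)))
--         memo[remaining] = res
--         return res
--
--     return solve(frozenset(adj))
-- ===== Notes on version B (the rewrite author's own statement) =====
-- stated objective: alternative
-- what changed: Replaces A's recursion over mutated dict copies (which re-solves identical residual graphs many times) by a single pure solver over the frozenset of remaining photos with a memo table keyed by that set, so each residual state is solved at most once; B does not mutate the caller's dict.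
-- outside the precondition, e.g. on min_page_feasible({1: [], 2: []}, -1): A returns 0, B returns 0
import Mathlib
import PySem

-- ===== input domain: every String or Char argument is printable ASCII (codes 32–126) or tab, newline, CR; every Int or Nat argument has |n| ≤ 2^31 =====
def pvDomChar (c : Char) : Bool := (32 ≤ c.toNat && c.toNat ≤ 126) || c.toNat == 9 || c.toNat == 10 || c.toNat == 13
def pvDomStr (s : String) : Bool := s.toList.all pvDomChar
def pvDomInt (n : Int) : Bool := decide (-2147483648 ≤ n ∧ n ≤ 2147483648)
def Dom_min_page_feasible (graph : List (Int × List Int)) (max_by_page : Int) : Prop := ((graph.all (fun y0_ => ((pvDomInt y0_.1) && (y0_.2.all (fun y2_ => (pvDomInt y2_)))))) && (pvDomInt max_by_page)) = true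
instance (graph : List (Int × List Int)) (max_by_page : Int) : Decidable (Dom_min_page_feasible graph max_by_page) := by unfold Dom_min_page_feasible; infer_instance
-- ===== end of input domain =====

-- B replaces A's recursion over mutated dict copies (which re-solves identical residual
-- graphs many times) by ONE pure solver over the frozenset of remaining photos with a memo
-- table keyed by that set, so each residual state is solved at most once; the equivalence
-- proved is about the RETURN value only — A deletes entries from the caller's dict as it
-- runs, B does not mutate its argument.

-- ===== PORT A =====
-- graph[v] (Python dict lookup; in every reachable state the keys of g are unique)
def aGet (g : List (Int × List Int)) (v : Int) : List Int := (PySem.Dict.mk g).getD v []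

-- roots(graph): result = set(graph.keys()); for each neighbourhood value v: result.discard(v)
def aRoots (g : List (Int × List Int)) : PySem.Set Int :=
  g.foldl (fun s p => p.2.foldl (fun s v => PySem.Set.discard s v) s)
    (PySem.Set.ofList (g.map Prod.fst))

-- the three lemmas below are cited by aRec's decreasing_by (termination only)
theorem pv_mem_foldl_discard {vs : List Int} {s : PySem.Set Int} {x : Int}
    (h : x ∈ vs.foldl (fun s v => PySem.Set.discard s v) s) : x ∈ s := by
  induction vs generalizing s with
  | nil => simpa using h
  | cons v vs ih =>
      have := ih (s := PySem.Set.discard s v) (by simpa using h)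
      exact ((PySem.Set.mem_discard s v x).1 this).1

theorem pv_mem_aRoots {g : List (Int × List Int)} {x : Int} (h : x ∈ aRoots g) :
    x ∈ g.map Prod.fst := by
  unfold aRoots at h
  have key : ∀ (g : List (Int × List Int)) (s : PySem.Set Int),
      x ∈ g.foldl (fun s p => p.2.foldl (fun s v => PySem.Set.discard s v) s) s → x ∈ s := by
    intro g
    induction g with
    | nil => intro s h; simpa using h
    | cons p g ih =>
        intro s h
        exact pv_mem_foldl_discard (ih _ h)
  have := key g _ h
  exact (PySem.Set.mem_ofList _ _).1 this

theorem pv_filter_lt {g : List (Int × List Int)} {xs : List Int} (hne : xs ≠ [])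
    (hsub : ∀ x ∈ xs, x ∈ g.map Prod.fst) :
    (g.filter (fun p => !xs.contains p.1)).length < g.length := by
  rw [List.length_filter_lt_length_iff_exists]
  obtain ⟨x, hx⟩ := List.exists_mem_of_ne_nil xs hne
  obtain ⟨p, hp, hpx⟩ := List.mem_map.1 (hsub x hx)
  exact ⟨p, hp, by simp [hpx, hx]⟩

-- min_page_feasible, recursive kernel (the dict is an assoc list with unique keys)
def aRec (g : List (Int × List Int)) (max_by_page : Int) : Int :=
  let n_photos : Int := (g.length : Int)
  if g.length = 0 then 0
  else if max_by_page = 1 then n_photos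
  else if hm : max_by_page ≤ 0 then 0
    -- guard for totality: Python raises ZeroDivisionError/ValueError or recurses forever here
  else
    -- Case 1: remove photos without dependency
    let photos_ready := aRoots g
    let photos_no_dependency := photos_ready.filter (fun v => (aGet g v).length == 0)
    if hiso : photos_no_dependency ≠ [] then
      max (aRec (g.filter (fun p => !photos_no_dependency.contains p.1)) max_by_page)
          (-(PySem.Int.floordiv (-n_photos) max_by_page))   -- int(math.ceil(n/m))
    else if hrts : photos_ready = [] then 0
      -- guard for totality: Python recurses forever (case 2 removes nothing)
    else if (photos_ready.length : Int) ≤ max_by_page then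
      -- Case 2: all available photos fit on the next page
      1 + aRec (g.filter (fun p => !photos_ready.contains p.1)) max_by_page
    else
      -- Case 3: brute force over all combinations for the next page
      ((List.sublistsLen max_by_page.toNat photos_ready).attach.map
          (fun pp => 1 + aRec (g.filter (fun p => !pp.1.contains p.1)) max_by_page)).foldl
        min n_photos
termination_by g.length
decreasing_by
  all_goals simp only [List.unattach_filter, List.unattach_attach]
  · exact pv_filter_lt hiso (fun x hx => pv_mem_aRoots (List.mem_of_mem_filter hx))
  · exact pv_filter_lt hrts (fun x hx => pv_mem_aRoots hx)
  · rcases List.mem_sublistsLen.1 pp.2 with ⟨hsl, hlen⟩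
    refine pv_filter_lt (fun hn => ?_) (fun x hx => pv_mem_aRoots (hsl.subset hx))
    rw [hn] at hlen; simp at hlen; omega

def min_page_feasible (graph : List (Int × List Int)) (max_by_page : Int) : Int :=
  aRec (PySem.Dict.ofList graph).items max_by_page

-- ===== PORT B =====
-- adj[u] (the adjacency is fixed once, from the input dict)
def bAdj (G : List (Int × List Int)) (u : Int) : List Int := (PySem.Dict.mk G).getD u []

-- solve(remaining): one pure solver, memoised on the frozenset of remaining photos.
-- A frozenset of keys is represented canonically as the sublist of the key list it induces;
-- fuel (> |remaining| at every call) only makes the recursion total in Lean.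
def bSolve (G : List (Int × List Int)) (max_by_page : Int) :
    Nat → List Int → PySem.Dict (List Int) Int → Int × PySem.Dict (List Int) Int
  | 0, _, memo => (0, memo)
  | fuel+1, rem, memo =>
    let n : Int := (rem.length : Int)
    if rem.length = 0 then (0, memo)
    else if max_by_page = 1 then (n, memo)
    else
      match memo.get? rem with
      | some v => (v, memo)
      | none =>
        let blocked : PySem.Set Int := PySem.Set.ofList (rem.flatMap (fun u => bAdj G u))
        let ready := rem.filter (fun v => !(PySem.Set.contains blocked v))
        let isolated := ready.filter (fun v => (bAdj G v).isEmpty)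
        let res :=
          if isolated.isEmpty = false then
            let r := bSolve G max_by_page fuel (rem.filter (fun v => !(isolated.contains v))) memo
            (max r.1 (-(PySem.Int.floordiv (-n) max_by_page)), r.2)
          else if (ready.length : Int) ≤ max_by_page then
            let r := bSolve G max_by_page fuel (rem.filter (fun v => !(ready.contains v))) memo
            (1 + r.1, r.2)
          else
            (List.sublistsLen max_by_page.toNat ready).foldl
              (fun acc page =>
                let r := bSolve G max_by_page fuel (rem.filter (fun v => !(page.contains v))) acc.2
                (min acc.1 (1 + r.1), r.2))
              (n, memo)
        (res.1, res.2.insert rem res.1)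

def min_page_feasible_alt (graph : List (Int × List Int)) (max_by_page : Int) : Int :=
  (bSolve (PySem.Dict.ofList graph).items max_by_page ((PySem.Dict.ofList graph).items.length + 1)
    ((PySem.Dict.ofList graph).items.map Prod.fst) PySem.Dict.empty).1

-- ===== PRECONDITION & SPEC =====
-- Pre_ excludes nonpositive max_by_page with a nonempty graph (A divides by zero for 0 and its
-- page enumeration raises ValueError for negative sizes; only dependency-free graphs escape, and
-- there B returns the same value) and graphs whose precedence relation has a cycle among the
-- keys (A recurses forever: every nonempty subset of keys must contain a root).
def Pre_min_page_feasible (graph : List (Int × List Int)) (max_by_page : Int) : Prop :=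
  graph = [] ∨ max_by_page = 1 ∨
    (2 ≤ max_by_page ∧
      ∀ S ∈ ((PySem.Dict.ofList graph).items.map Prod.fst).sublists, S ≠ [] →
        ∃ k ∈ S, ∀ p ∈ (PySem.Dict.ofList graph).items, p.1 ∈ S → k ∉ p.2)
instance (graph : List (Int × List Int)) (max_by_page : Int) :
    Decidable (Pre_min_page_feasible graph max_by_page) := by
  unfold Pre_min_page_feasible; infer_instance

def pvWitness_min_page_feasible : (List (Int × List Int)) × Int := ([(1, [2]), (2, []), (3, [2])], 2)

def Spec_min_page_feasible (graph : List (Int × List Int)) (max_by_page : Int) (out : Int) : Prop := out = min_page_feasible_alt graph max_by_page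
instance (graph : List (Int × List Int)) (max_by_page : Int) (out : Int) : Decidable (Spec_min_page_feasible graph max_by_page out) := by unfold Spec_min_page_feasible; infer_instance

-- ===== CLAIM (what is proved, stated in full; the proofs are below) =====
def Claim_equal_min_page_feasible : Prop := ∀ (graph : List (Int × List Int)) (max_by_page : Int), Dom_min_page_feasible graph max_by_page → Pre_min_page_feasible graph max_by_page → Spec_min_page_feasible graph max_by_page (min_page_feasible graph max_by_page)

-- ===== LEMMAS AND PROOFS =====

-- the induced subgraph: the input dict with only the keys in rem kept (deletion keeps order)
def restrict (G : List (Int × List Int)) (rem : List Int) : List (Int × List Int) :=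
  G.filter (fun p => decide (p.1 ∈ rem))

theorem pv_getD_mk_map (rem : List Int) (f : Int → List Int) (v : Int) (hv : v ∈ rem) :
    (PySem.Dict.mk (rem.map (fun k => (k, f k)))).getD v [] = f v := by
  induction rem with
  | nil => simp at hv
  | cons k rem ih =>
      rw [PySem.Dict.getD_eq_get?_getD] at *
      rw [List.map_cons, PySem.Dict.get?_mk_cons]
      by_cases h : k = v
      · simp [h]
      · simp only [beq_iff_eq, h, if_false]
        exact ih (List.mem_cons.1 hv |>.resolve_left (fun h' => h h'.symm))

theorem pv_contains_ofList (vs : List Int) (v : Int) :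
    PySem.Set.contains (PySem.Set.ofList vs) v = vs.contains v := by
  rw [Bool.eq_iff_iff]; simp [PySem.Set.mem_ofList]

theorem pv_bAdj_cons_ne (p : Int × List Int) (G : List (Int × List Int)) (k : Int)
    (h : k ≠ p.1) : bAdj (p :: G) k = bAdj G k := by
  unfold bAdj
  rw [PySem.Dict.getD_eq_get?_getD, PySem.Dict.getD_eq_get?_getD]
  have : PySem.Dict.mk (p :: G) = PySem.Dict.mk ((p.1, p.2) :: G) := by simp
  rw [this, PySem.Dict.get?_mk_cons]
  simp [Ne.symm h]

theorem restrict_eq_map (G : List (Int × List Int)) (rem : List Int)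
    (hnd : (G.map Prod.fst).Nodup) (hsub : rem.Sublist (G.map Prod.fst)) :
    restrict G rem = rem.map (fun k => (k, bAdj G k)) := by
  induction G generalizing rem with
  | nil =>
      have : rem = [] := List.sublist_nil.1 (by simpa using hsub)
      simp [restrict, this]
  | cons p G ih =>
      rw [List.map_cons] at hsub hnd
      have hp1 : p.1 ∉ G.map Prod.fst := (List.nodup_cons.1 hnd).1
      have hnd' : (G.map Prod.fst).Nodup := (List.nodup_cons.1 hnd).2
      cases hsub with
      | cons _ h =>
          have hpr : p.1 ∉ rem := fun hm => hp1 (h.subset hm)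
          have : restrict (p :: G) rem = restrict G rem := by
            unfold restrict
            rw [List.filter_cons]
            simp [hpr]
          rw [this, ih rem hnd' h]
          exact List.map_congr_left (fun k hk => by
            rw [pv_bAdj_cons_ne p G k (fun he => hpr (he ▸ hk))])
      | cons₂ _ h =>
          rename_i rem'
          have hstep : restrict (p :: G) (p.1 :: rem') = p :: restrict G (p.1 :: rem') := by
            unfold restrict; rw [List.filter_cons]; simp
          have hdrop : restrict G (p.1 :: rem') = restrict G rem' := by
            unfold restrict
            refine List.filter_congr (fun q hq => ?_)
            have : q.1 ≠ p.1 := by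
              intro he; exact hp1 (he ▸ List.mem_map_of_mem hq)
            simp [List.mem_cons, this]
          rw [hstep, hdrop, ih rem' hnd' h, List.map_cons]
          have hb : bAdj (p :: G) p.1 = p.2 := by
            unfold bAdj
            rw [PySem.Dict.getD_eq_get?_getD]
            have : PySem.Dict.mk (p :: G) = PySem.Dict.mk ((p.1, p.2) :: G) := by simp
            rw [this, PySem.Dict.get?_mk_cons]; simp
          rw [hb]
          refine congrArg _ (List.map_congr_left (fun k hk => ?_))
          have : k ≠ p.1 := fun he => hp1 (he ▸ h.subset hk)
          rw [pv_bAdj_cons_ne p G k this]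

theorem foldl_discard_filter (vs s : List Int) :
    vs.foldl (fun s v => PySem.Set.discard s v) s = s.filter (fun x => !vs.contains x) := by
  induction vs generalizing s with
  | nil => simp
  | cons v vs ih =>
      rw [List.foldl_cons, ih]
      unfold PySem.Set.discard
      rw [List.filter_filter]
      refine List.filter_congr (fun x _ => ?_)
      rw [Bool.eq_iff_iff]
      simp
      tauto

theorem aRoots_restrict (G : List (Int × List Int)) (rem : List Int)
    (hnd : (G.map Prod.fst).Nodup) (hsub : rem.Sublist (G.map Prod.fst)) :
    aRoots (restrict G rem) =
      rem.filter (fun v => !(PySem.Set.contains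
        (PySem.Set.ofList (rem.flatMap (fun u => bAdj G u))) v)) := by
  have hmap := restrict_eq_map G rem hnd hsub
  have hflat : ∀ (g : List (Int × List Int)) (s : PySem.Set Int),
      g.foldl (fun s p => p.2.foldl (fun s v => PySem.Set.discard s v) s) s
        = (g.flatMap (fun p => p.2)).foldl (fun s v => PySem.Set.discard s v) s := by
    intro g
    induction g with
    | nil => intro s; simp
    | cons p g ihg => intro s; simp [List.flatMap_cons, List.foldl_append, ihg]
  unfold aRoots
  rw [hflat, foldl_discard_filter, hmap]
  have hkeys : ((rem.map (fun k => (k, bAdj G k))).map Prod.fst) = rem := by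
    rw [List.map_map]; exact List.map_id _
  rw [hkeys, PySem.Set.ofList_eq_self_of_nodup rem (hsub.nodup hnd),
    List.flatMap_map]
  refine List.filter_congr (fun x _ => ?_)
  rw [pv_contains_ofList]

theorem aGet_restrict (G : List (Int × List Int)) (rem : List Int) (v : Int)
    (hnd : (G.map Prod.fst).Nodup) (hsub : rem.Sublist (G.map Prod.fst)) (hv : v ∈ rem) :
    aGet (restrict G rem) v = bAdj G v := by
  rw [restrict_eq_map G rem hnd hsub]
  exact pv_getD_mk_map rem (fun k => bAdj G k) v hv

theorem restrict_filter (G : List (Int × List Int)) (rem : List Int) (xs : List Int) :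
    (restrict G rem).filter (fun p => !xs.contains p.1) =
      restrict G (rem.filter (fun v => !xs.contains v)) := by
  unfold restrict
  rw [List.filter_filter]
  refine List.filter_congr (fun p _ => ?_)
  rw [Bool.eq_iff_iff]
  simp [List.mem_filter]
  tauto

theorem pv_pair_of_mem_keys (G : List (Int × List Int)) (u : Int)
    (hu : u ∈ G.map Prod.fst) : (u, bAdj G u) ∈ G := by
  cases h : (PySem.Dict.mk G).get? u with
  | none =>
      exact absurd ((PySem.Dict.get?_eq_none_iff_not_mem_keys _ u).1 h)
        (by simpa [PySem.Dict.keys] using hu)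
  | some v =>
      have hm := PySem.Dict.mem_items_of_get?_eq_some _ h
      have hb : bAdj G u = v := by
        unfold bAdj; rw [PySem.Dict.getD_eq_get?_getD, h]; rfl
      rw [hb]; exact hm

theorem bSolve_eq (G : List (Int × List Int)) (m : Int)
    (hnd : (G.map Prod.fst).Nodup) (hm : 2 ≤ m)
    (hroot : ∀ S, S.Sublist (G.map Prod.fst) → S ≠ [] →
      ∃ k ∈ S, ∀ p ∈ G, p.1 ∈ S → k ∉ p.2) :
    ∀ (fuel : Nat) (rem : List Int) (memo : PySem.Dict (List Int) Int),
      rem.Sublist (G.map Prod.fst) → rem.length < fuel →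
      memo.keys.Nodup → (∀ kv ∈ memo.items, kv.2 = aRec (restrict G kv.1) m) →
      (bSolve G m fuel rem memo).1 = aRec (restrict G rem) m
      ∧ (bSolve G m fuel rem memo).2.keys.Nodup
      ∧ (∀ kv ∈ (bSolve G m fuel rem memo).2.items, kv.2 = aRec (restrict G kv.1) m) := by
  intro fuel
  induction fuel with
  | zero => intro rem memo _ hlt _ _; exact absurd hlt (Nat.not_lt_zero _)
  | succ fuel IH =>
    intro rem memo hsub hlt hkn hinv
    by_cases h0 : rem.length = 0
    · have hrem : rem = [] := List.length_eq_zero_iff.1 h0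
      have hres : restrict G rem = [] := by simp [hrem, restrict]
      have hb : bSolve G m (fuel+1) rem memo = (0, memo) := by
        simp only [bSolve]; rw [if_pos h0]
      rw [hb, hres]
      exact ⟨by simp [aRec], hkn, hinv⟩
    · have hrlen : (restrict G rem).length = rem.length := by
        rw [restrict_eq_map G rem hnd hsub, List.length_map]
      have hm1 : ¬ (m = 1) := by omega
      have hm0 : ¬ (m ≤ 0) := by omega
      have hremne : rem ≠ [] := fun h => h0 (by simp [h])
      cases hget : memo.get? rem with
      | some v =>
          have hb : bSolve G m (fuel+1) rem memo = (v, memo) := by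
            simp only [bSolve]
            rw [if_neg h0, if_neg hm1, hget]
          rw [hb]
          exact ⟨hinv (rem, v)
            ((PySem.Dict.get?_eq_some_iff_mem_items memo rem v hkn).1 hget), hkn, hinv⟩
      | none =>
          -- the names of the port's intermediate values
          set blocked : PySem.Set Int :=
            PySem.Set.ofList (rem.flatMap (fun u => bAdj G u)) with hblocked
          set ready := rem.filter (fun v => !(PySem.Set.contains blocked v)) with hready
          set isolated := ready.filter (fun v => (bAdj G v).isEmpty) with hisolated
          have hsubready : ready.Sublist rem := List.filter_sublist
          have E1 : aRoots (restrict G rem) = ready := aRoots_restrict G rem hnd hsub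
          have E2 : (aRoots (restrict G rem)).filter
              (fun v => (aGet (restrict G rem) v).length == 0) = isolated := by
            rw [E1, hisolated]
            refine List.filter_congr (fun v hv => ?_)
            rw [aGet_restrict G rem v hnd hsub (hsubready.subset hv)]
            cases bAdj G v <;> simp
          have hreadyne : ready ≠ [] := by
            obtain ⟨k, hk, hkroot⟩ := hroot rem hsub hremne
            have hkready : k ∈ ready := by
              rw [hready]
              refine List.mem_filter.2 ⟨hk, ?_⟩
              have hnin : k ∉ rem.flatMap (fun u => bAdj G u) := by
                intro hkin
                obtain ⟨u, hu, hku⟩ := List.mem_flatMap.1 hkin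
                exact hkroot (u, bAdj G u) (pv_pair_of_mem_keys G u (hsub.subset hu)) hu hku
              simp [hblocked, hnin]
            exact fun h => by rw [h] at hkready; exact absurd hkready (List.not_mem_nil)
          -- the A side, rewritten to the B side's intermediate values
          have hA : aRec (restrict G rem) m =
              if isolated ≠ [] then
                max (aRec (restrict G (rem.filter (fun v => !isolated.contains v))) m)
                  (-(PySem.Int.floordiv (-(rem.length : Int)) m))
              else if (ready.length : Int) ≤ m then
                1 + aRec (restrict G (rem.filter (fun v => !ready.contains v))) m
              else
                ((List.sublistsLen m.toNat ready).foldl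
                  (fun a page =>
                    min a (1 + aRec (restrict G (rem.filter (fun v => !page.contains v))) m))
                  (rem.length : Int)) := by
            conv_lhs => rw [aRec]
            simp only [dite_eq_ite]
            rw [hrlen, if_neg h0, if_neg hm1, if_neg hm0, E2, E1, if_neg hreadyne]
            simp only [PySem.Set.contains_eq_listContains, restrict_filter,
              List.foldl_map]
            split_ifs
            · rfl
            · rfl
            · exact List.foldl_attach
                (f := fun a (page : List Int) => min a (1 + aRec (restrict G (List.filter (fun v => !page.contains v) rem)) m))
                (b := ((rem.length : Int)))
          -- one recursive call of the B side, via the fuel induction hypothesis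
          have hcall : ∀ (xs : List Int) (memo1 : PySem.Dict (List Int) Int),
              xs ≠ [] → (∀ x ∈ xs, x ∈ rem) →
              memo1.keys.Nodup → (∀ kv ∈ memo1.items, kv.2 = aRec (restrict G kv.1) m) →
              (bSolve G m fuel (rem.filter (fun v => !xs.contains v)) memo1).1
                  = aRec (restrict G (rem.filter (fun v => !xs.contains v))) m
                ∧ (bSolve G m fuel (rem.filter (fun v => !xs.contains v)) memo1).2.keys.Nodup
                ∧ (∀ kv ∈ (bSolve G m fuel (rem.filter (fun v => !xs.contains v)) memo1).2.items,
                    kv.2 = aRec (restrict G kv.1) m) := by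
            intro xs memo1 hne hxs hkn1 hinv1
            have hdec : (rem.filter (fun v => !xs.contains v)).length < rem.length := by
              rw [List.length_filter_lt_length_iff_exists]
              obtain ⟨x, hx⟩ := List.exists_mem_of_ne_nil xs hne
              exact ⟨x, hxs x hx, by simp [hx]⟩
            exact IH _ memo1 (List.filter_sublist.trans hsub) (by omega) hkn1 hinv1
          have main : ∃ (val : Int) (memo' : PySem.Dict (List Int) Int),
              bSolve G m (fuel+1) rem memo = (val, memo'.insert rem val)
              ∧ val = aRec (restrict G rem) m
              ∧ memo'.keys.Nodup
              ∧ (∀ kv ∈ memo'.items, kv.2 = aRec (restrict G kv.1) m) := by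
            have hbs := bSolve.eq_2 G m rem memo fuel
            rw [if_neg h0, if_neg hm1, hget] at hbs
            simp only [← hblocked, ← hready, ← hisolated] at hbs
            by_cases hiso : isolated = []
            · rw [if_neg (by simp [hiso])] at hbs
              by_cases hle : (ready.length : Int) ≤ m
              · rw [if_pos hle] at hbs
                obtain ⟨i1, i2, i3⟩ := hcall ready memo hreadyne
                  (fun x hx => hsubready.subset hx) hkn hinv
                refine ⟨_, _, hbs, ?_, i2, i3⟩
                rw [hA, if_neg (by simp [hiso]), if_pos hle, i1]
              · rw [if_neg hle] at hbs
                have hpages : ∀ page ∈ List.sublistsLen m.toNat ready,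
                    page ≠ [] ∧ ∀ x ∈ page, x ∈ rem := by
                  intro page hpage
                  obtain ⟨hsl, hlen⟩ := List.mem_sublistsLen.1 hpage
                  constructor
                  · intro hnil
                    rw [hnil] at hlen
                    simp at hlen
                    omega
                  · exact fun x hx => hsubready.subset (hsl.subset hx)
                have hfold : ∀ (pgs : List (List Int)) (acc : Int)
                    (memo1 : PySem.Dict (List Int) Int),
                    memo1.keys.Nodup →
                    (∀ kv ∈ memo1.items, kv.2 = aRec (restrict G kv.1) m) →
                    (∀ page ∈ pgs, page ≠ [] ∧ ∀ x ∈ page, x ∈ rem) →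
                    (pgs.foldl (fun acc page =>
                        (min acc.1 (1 + (bSolve G m fuel (rem.filter (fun v => !(page.contains v))) acc.2).1),
                          (bSolve G m fuel (rem.filter (fun v => !(page.contains v))) acc.2).2))
                        (acc, memo1)).1
                      = pgs.foldl (fun a page =>
                          min a (1 + aRec (restrict G (rem.filter (fun v => !page.contains v))) m)) acc
                    ∧ (pgs.foldl (fun acc page =>
                        (min acc.1 (1 + (bSolve G m fuel (rem.filter (fun v => !(page.contains v))) acc.2).1),
                          (bSolve G m fuel (rem.filter (fun v => !(page.contains v))) acc.2).2))
                        (acc, memo1)).2.keys.Nodup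
                    ∧ (∀ kv ∈ (pgs.foldl (fun acc page =>
                        (min acc.1 (1 + (bSolve G m fuel (rem.filter (fun v => !(page.contains v))) acc.2).1),
                          (bSolve G m fuel (rem.filter (fun v => !(page.contains v))) acc.2).2))
                        (acc, memo1)).2.items, kv.2 = aRec (restrict G kv.1) m) := by
                  intro pgs
                  induction pgs with
                  | nil => intro acc memo1 hkn1 hinv1 _; exact ⟨rfl, hkn1, hinv1⟩
                  | cons page pgs ihp =>
                      intro acc memo1 hkn1 hinv1 hp
                      obtain ⟨hpne, hpsub⟩ := hp page List.mem_cons_self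
                      obtain ⟨i1, i2, i3⟩ := hcall page memo1 hpne hpsub hkn1 hinv1
                      simp only [List.foldl_cons, i1]
                      exact ihp _ _ i2 i3 (fun q hq => hp q (List.mem_cons_of_mem _ hq))
                obtain ⟨f1, f2, f3⟩ := hfold (List.sublistsLen m.toNat ready)
                  ((rem.length : Int)) memo hkn hinv hpages
                refine ⟨_, _, hbs, ?_, f2, f3⟩
                rw [hA, if_neg (by simp [hiso]), if_neg hle, f1]
            · rw [if_pos (List.isEmpty_eq_false_iff.mpr hiso)] at hbs
              obtain ⟨i1, i2, i3⟩ := hcall isolated memo hiso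
                (fun x hx => hsubready.subset (List.mem_of_mem_filter hx)) hkn hinv
              refine ⟨_, _, hbs, ?_, i2, i3⟩
              rw [hA, if_pos hiso, i1]
          obtain ⟨val, memo', hpair, hval, hkn', hinv'⟩ := main
          rw [hpair]
          refine ⟨hval, PySem.Dict.nodup_keys_insert memo' rem val hkn', ?_⟩
          intro kv hkv
          rcases (PySem.Dict.mem_items_insert memo' rem val kv).1 hkv with h | h
          · rw [h]; exact hval
          · exact hinv' kv h.1


-- ===== VERDICT (by name: the statement is the Claim_ definition above) =====
theorem min_page_feasible_spec : Claim_equal_min_page_feasible := by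
  intro graph m _ hpre
  unfold Spec_min_page_feasible min_page_feasible min_page_feasible_alt
  rcases hpre with h | h | ⟨hm, hroot⟩
  · subst h
    have hb := bSolve.eq_2 (PySem.Dict.ofList ([] : List (Int × List Int))).items m
      ((PySem.Dict.ofList ([] : List (Int × List Int))).items.map Prod.fst) PySem.Dict.empty
      (PySem.Dict.ofList ([] : List (Int × List Int))).items.length
    have hnil : (PySem.Dict.ofList ([] : List (Int × List Int))).items = [] := rfl
    rw [aRec, hb]
    simp [hnil]
  · subst h
    have hb := bSolve.eq_2 (PySem.Dict.ofList graph).items 1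
      ((PySem.Dict.ofList graph).items.map Prod.fst) PySem.Dict.empty
      (PySem.Dict.ofList graph).items.length
    rw [aRec, hb]
    by_cases h0 : (PySem.Dict.ofList graph).items.length = 0
    · simp [h0]
    · simp [h0, List.length_map]
  · have hnd : ((PySem.Dict.ofList graph).items.map Prod.fst).Nodup := by
      have := PySem.Dict.nodup_keys_ofList (ν := List Int) graph
      simpa [PySem.Dict.keys] using this
    have hroot' : ∀ S, S.Sublist ((PySem.Dict.ofList graph).items.map Prod.fst) → S ≠ [] →
        ∃ k ∈ S, ∀ p ∈ (PySem.Dict.ofList graph).items, p.1 ∈ S → k ∉ p.2 :=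
      fun S hs hne => hroot S (List.mem_sublists.2 hs) hne
    obtain ⟨h1, -, -⟩ := bSolve_eq (PySem.Dict.ofList graph).items m hnd hm hroot'
      ((PySem.Dict.ofList graph).items.length + 1)
      ((PySem.Dict.ofList graph).items.map Prod.fst) PySem.Dict.empty
      (List.Sublist.refl _) (by rw [List.length_map]; omega)
      (PySem.Dict.nodup_keys_empty)
      (by intro kv hkv; exact absurd hkv List.not_mem_nil)
    rw [h1]
    have hres : restrict (PySem.Dict.ofList graph).items
        ((PySem.Dict.ofList graph).items.map Prod.fst) = (PySem.Dict.ofList graph).items := by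
      unfold restrict
      exact List.filter_eq_self.2 (fun p hp => by simp [List.mem_map_of_mem hp])
    rw [hres]
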